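-- pv_equiv track=rewrite | github.com/icefoxtail/AP------ | archive/build_db.py | count_top_level_objects_in_array
-- ===== SOURCE A (Python) =====
-- def count_top_level_objects_in_array(array_text):
--     depth_brace = 0
--     depth_bracket = 0
--     count = 0
--
--     in_single = in_double = in_backtick = False
--     in_line_comment = in_block_comment = False
--     escape = False
--
--     for i, ch in enumerate(array_text):
--         nxt = array_text[i + 1] if i + 1 < len(array_text) else ""
--
--         if in_line_comment:
--             if ch == "\n":
--                 in_line_comment = False
--             continue
--         if in_block_comment:
--             if ch == "*" and nxt == "/":
--                 in_block_comment = False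
--             continue
--         if in_single:
--             if escape:
--                 escape = False
--             elif ch == "\\":
--                 escape = True
--             elif ch == "'":
--                 in_single = False
--             continue
--         if in_double:
--             if escape:
--                 escape = False
--             elif ch == "\\":
--                 escape = True
--             elif ch == '"':
--                 in_double = False
--             continue
--         if in_backtick:
--             if escape:
--                 escape = False
--             elif ch == "\\":
--                 escape = True
--             elif ch == "`":
--                 in_backtick = False
--             continue
--
--         if ch == "/" and nxt == "/":
--             in_line_comment = True
--             continue
--         if ch == "/" and nxt == "*":
--             in_block_comment = True
--             continue
--         if ch == "'":
--             in_single = True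
--             continue
--         if ch == '"':
--             in_double = True
--             continue
--         if ch == "`":
--             in_backtick = True
--             continue
--
--         if ch == "[":
--             depth_bracket += 1
--             continue
--         if ch == "]":
--             depth_bracket -= 1
--             continue
--
--         if ch == "{":
--             if depth_bracket == 1 and depth_brace == 0:
--                 count += 1
--             depth_brace += 1
--             continue
--         if ch == "}":
--             depth_brace -= 1
--             continue
--
--     return count
-- ===== SOURCE B (Python) =====
-- def count_top_level_objects_in_array(array_text):
--     n = len(array_text)
--     depth_bracket = depth_brace = count = 0
--     i = 0
--     while i < n:
--         ch = array_text[i]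
--         if ch == '/' and i + 1 < n and array_text[i + 1] == '/':
--             # line comment: consume through the newline
--             j = array_text.find('\n', i + 2)
--             i = n if j == -1 else j + 1
--         elif ch == '/' and i + 1 < n and array_text[i + 1] == '*':
--             # block comment: consume up to the '/' of the closing '*/'
--             j = array_text.find('*/', i + 1)
--             i = n if j == -1 else j + 1
--         elif ch in ("'", '"', '`'):
--             # string/template literal: consume to the matching delimiter
--             j = i + 1
--             while j < n:
--                 if array_text[j] == '\\':
--                     j += 2
--                 elif array_text[j] == ch:
--                     break
--                 else:
--                     j += 1
--             i = j + 1
--         else: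
--             if ch == '[':
--                 depth_bracket += 1
--             elif ch == ']':
--                 depth_bracket -= 1
--             elif ch == '{':
--                 if depth_bracket == 1 and depth_brace == 0:
--                     count += 1
--                 depth_brace += 1
--             elif ch == '}':
--                 depth_brace -= 1
--             i += 1
--     return count
-- ===== Notes on version B (the rewrite author's own statement) =====
-- stated objective: alternative
-- what changed: Replaced A's per-character state machine with persistent in_string/in_comment/escape flags by an index-advancing scanner that dispatches on the current char and consumes each whole string literal, line comment or block comment with an inner span scan (str.find / a small while loop), keeping only the bracket/brace depths and the count.
import Mathlib
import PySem

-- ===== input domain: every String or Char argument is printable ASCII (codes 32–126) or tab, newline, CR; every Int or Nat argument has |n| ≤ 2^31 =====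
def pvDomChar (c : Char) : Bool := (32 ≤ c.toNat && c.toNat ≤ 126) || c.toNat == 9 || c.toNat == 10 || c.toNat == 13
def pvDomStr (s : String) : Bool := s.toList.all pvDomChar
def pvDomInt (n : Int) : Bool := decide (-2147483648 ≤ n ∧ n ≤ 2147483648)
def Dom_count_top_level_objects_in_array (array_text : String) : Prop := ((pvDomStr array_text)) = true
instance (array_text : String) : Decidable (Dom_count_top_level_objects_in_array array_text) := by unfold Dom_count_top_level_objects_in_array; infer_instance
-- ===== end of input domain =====

-- B replaces A's persistent flag state machine (in_string/in_comment/escape flags threaded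
-- through one per-character loop) by a dispatching scanner whose inner span-consumers swallow
-- each string literal or comment in one go; same result, different decomposition (objective: alternative).

-- ===== PORT A =====
-- the mutable locals of A's loop, in order
structure PvSt where
  br : Int      -- depth_brace
  bk : Int      -- depth_bracket
  cnt : Int     -- count
  s1 : Bool     -- in_single
  s2 : Bool     -- in_double
  s3 : Bool     -- in_backtick
  lc : Bool     -- in_line_comment
  bc : Bool     -- in_block_comment
  esc : Bool    -- escape
deriving Repr, DecidableEq

-- one iteration of A's for-loop body; nxt = array_text[i+1] (none at end of text)
def pvStepA (st : PvSt) (ch : Char) (nxt : Option Char) : PvSt :=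
  if st.lc then (if ch = '\n' then { st with lc := false } else st)
  else if st.bc then (if ch = '*' ∧ nxt = some '/' then { st with bc := false } else st)
  else if st.s1 then
    (if st.esc then { st with esc := false }
     else if ch = '\\' then { st with esc := true }
     else if ch = '\'' then { st with s1 := false } else st)
  else if st.s2 then
    (if st.esc then { st with esc := false }
     else if ch = '\\' then { st with esc := true }
     else if ch = '"' then { st with s2 := false } else st)
  else if st.s3 then
    (if st.esc then { st with esc := false }
     else if ch = '\\' then { st with esc := true }
     else if ch = '`' then { st with s3 := false } else st)
  else if ch = '/' ∧ nxt = some '/' then { st with lc := true }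
  else if ch = '/' ∧ nxt = some '*' then { st with bc := true }
  else if ch = '\'' then { st with s1 := true }
  else if ch = '"' then { st with s2 := true }
  else if ch = '`' then { st with s3 := true }
  else if ch = '[' then { st with bk := st.bk + 1 }
  else if ch = ']' then { st with bk := st.bk - 1 }
  else if ch = '{' then
    { st with cnt := if st.bk = 1 ∧ st.br = 0 then st.cnt + 1 else st.cnt, br := st.br + 1 }
  else if ch = '}' then { st with br := st.br - 1 }
  else st

def pvLoopA : PvSt → List Char → PvSt
  | st, [] => st
  | st, c :: rest => pvLoopA (pvStepA st c rest.head?) rest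

def count_top_level_objects_in_array (array_text : String) : Int :=
  (pvLoopA ⟨0, 0, 0, false, false, false, false, false, false⟩ array_text.toList).cnt

-- ===== PORT B =====
-- consume a line comment: everything through the newline (find('\n') in Source B)
def pvSkipLine : List Char → List Char
  | [] => []
  | c :: rest => if c = '\n' then rest else pvSkipLine rest

-- consume a block comment up to (and excluding) the '/' of the closing '*/' (find('*/') in Source B)
def pvSkipBlock : List Char → List Char
  | [] => []
  | c :: rest => if c = '*' ∧ rest.head? = some '/' then rest else pvSkipBlock rest

-- consume a string literal to its matching delimiter q; backslash skips the next char
def pvSkipStr (q : Char) : List Char → List Char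
  | [] => []
  | c :: rest =>
      if c = '\\' then pvSkipStr q (rest.drop 1)
      else if c = q then rest
      else pvSkipStr q rest
termination_by l => l.length
decreasing_by all_goals (simp; try omega)

theorem pvSkipLine_length_le : ∀ l : List Char, (pvSkipLine l).length ≤ l.length := by
  intro l; induction l with
  | nil => simp [pvSkipLine]
  | cons c rest ih =>
      simp only [pvSkipLine]
      split
      · simp
      · simp only [List.length_cons]; omega

theorem pvSkipBlock_length_le : ∀ l : List Char, (pvSkipBlock l).length ≤ l.length := by
  intro l; induction l with
  | nil => simp [pvSkipBlock]
  | cons c rest ih =>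
      simp only [pvSkipBlock]
      split
      · simp
      · simp only [List.length_cons]; omega

theorem pvSkipStr_length_le (q : Char) : ∀ (n : Nat) (l : List Char), l.length ≤ n →
    (pvSkipStr q l).length ≤ l.length := by
  intro n
  induction n with
  | zero =>
      intro l hl
      cases l with
      | nil => simp [pvSkipStr]
      | cons c rest => simp at hl
  | succ n ih =>
      intro l hl
      cases l with
      | nil => simp [pvSkipStr]
      | cons c rest =>
          simp only [List.length_cons] at hl
          simp only [pvSkipStr]
          split_ifs with h1 h2
          · have := ih (rest.drop 1) (by simp; omega)
            simp at this ⊢; omega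
          · simp
          · have := ih rest (by omega)
            simp; omega

-- the main scan of Source B: while i < n, dispatch on the current char
def pvLoopB (bk br cnt : Int) : List Char → Int
  | [] => cnt
  | c :: rest =>
      if c = '/' ∧ rest.head? = some '/' then pvLoopB bk br cnt (pvSkipLine (rest.drop 1))
      else if c = '/' ∧ rest.head? = some '*' then pvLoopB bk br cnt (pvSkipBlock rest)
      else if c = '\'' ∨ c = '"' ∨ c = '`' then pvLoopB bk br cnt (pvSkipStr c rest)
      else if c = '[' then pvLoopB (bk + 1) br cnt rest
      else if c = ']' then pvLoopB (bk - 1) br cnt rest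
      else if c = '{' then pvLoopB bk (br + 1) (if bk = 1 ∧ br = 0 then cnt + 1 else cnt) rest
      else if c = '}' then pvLoopB bk (br - 1) cnt rest
      else pvLoopB bk br cnt rest
termination_by l => l.length
decreasing_by
  · have h1 := pvSkipLine_length_le (rest.drop 1)
    simp at h1 ⊢; omega
  · have := pvSkipBlock_length_le rest; simp at this ⊢; omega
  · have := pvSkipStr_length_le c rest.length rest (le_refl _); simp at this ⊢; omega
  all_goals (simp; try omega)

def count_top_level_objects_in_array_alt (array_text : String) : Int :=
  pvLoopB 0 0 0 array_text.toList

-- ===== PRECONDITION & SPEC =====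
def Spec_count_top_level_objects_in_array (array_text : String) (out : Int) : Prop := out = count_top_level_objects_in_array_alt array_text
instance (array_text : String) (out : Int) : Decidable (Spec_count_top_level_objects_in_array array_text out) := by unfold Spec_count_top_level_objects_in_array; infer_instance

-- ===== CLAIM (what is proved, stated in full; the proofs are below) =====
def Claim_equal_count_top_level_objects_in_array : Prop := ∀ (array_text : String), Dom_count_top_level_objects_in_array array_text → Spec_count_top_level_objects_in_array array_text (count_top_level_objects_in_array array_text)

-- ===== LEMMAS AND PROOFS =====

-- A's neutral state: all flags off
def pvN (bk br cnt : Int) : PvSt := ⟨br, bk, cnt, false, false, false, false, false, false⟩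

theorem pvLineA (bk br cnt : Int) : ∀ l : List Char,
    (pvLoopA { pvN bk br cnt with lc := true } l).cnt
      = (pvLoopA (pvN bk br cnt) (pvSkipLine l)).cnt := by
  intro l
  induction l with
  | nil => simp [pvLoopA, pvSkipLine]
  | cons c rest ih =>
      by_cases h : c = '\n'
      · subst h; simp [pvLoopA, pvSkipLine, pvStepA, pvN]
      · simp [pvLoopA, pvSkipLine, pvStepA, pvN, h] at ih ⊢; exact ih

theorem pvBlockA (bk br cnt : Int) : ∀ l : List Char,
    (pvLoopA { pvN bk br cnt with bc := true } l).cnt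
      = (pvLoopA (pvN bk br cnt) (pvSkipBlock l)).cnt := by
  intro l
  induction l with
  | nil => simp [pvLoopA, pvSkipBlock]
  | cons c rest ih =>
      by_cases h : c = '*' ∧ rest.head? = some '/'
      · obtain ⟨rfl, hh⟩ := h
        simp [pvLoopA, pvSkipBlock, pvStepA, pvN, hh]
      · simp [pvLoopA, pvSkipBlock, pvStepA, pvN, h] at ih ⊢; exact ih


theorem pvStr1A (bk br cnt : Int) : ∀ (n : Nat) (l : List Char), l.length ≤ n →
    (pvLoopA { pvN bk br cnt with s1 := true } l).cnt
      = (pvLoopA (pvN bk br cnt) (pvSkipStr '\'' l)).cnt := by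
  intro n
  induction n with
  | zero =>
      intro l hl
      have : l = [] := List.eq_nil_of_length_eq_zero (Nat.le_zero.mp hl)
      subst this; simp [pvLoopA, pvSkipStr]
  | succ n ih =>
      intro l hl
      cases l with
      | nil => simp [pvLoopA, pvSkipStr]
      | cons c rest =>
          by_cases hb : c = '\\'
          · subst hb
            cases rest with
            | nil => simp [pvLoopA, pvStepA, pvSkipStr, pvN]
            | cons d rest2 =>
                simp only [pvLoopA, pvSkipStr, pvStepA, pvN]
                simp only [List.length_cons] at hl
                have h2 := ih rest2 (by omega)
                simpa [pvLoopA, pvStepA, pvSkipStr, pvN] using h2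
          · by_cases hq : c = '\''
            · subst hq; simp [pvLoopA, pvStepA, pvSkipStr, pvN]
            · simp only [List.length_cons] at hl
              have h2 := ih rest (by omega)
              simpa [pvLoopA, pvStepA, pvSkipStr, pvN, hb, hq] using h2

theorem pvStr2A (bk br cnt : Int) : ∀ (n : Nat) (l : List Char), l.length ≤ n →
    (pvLoopA { pvN bk br cnt with s2 := true } l).cnt
      = (pvLoopA (pvN bk br cnt) (pvSkipStr '"' l)).cnt := by
  intro n
  induction n with
  | zero =>
      intro l hl
      have : l = [] := List.eq_nil_of_length_eq_zero (Nat.le_zero.mp hl)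
      subst this; simp [pvLoopA, pvSkipStr]
  | succ n ih =>
      intro l hl
      cases l with
      | nil => simp [pvLoopA, pvSkipStr]
      | cons c rest =>
          by_cases hb : c = '\\'
          · subst hb
            cases rest with
            | nil => simp [pvLoopA, pvStepA, pvSkipStr, pvN]
            | cons d rest2 =>
                simp only [pvLoopA, pvSkipStr, pvStepA, pvN]
                simp only [List.length_cons] at hl
                have h2 := ih rest2 (by omega)
                simpa [pvLoopA, pvStepA, pvSkipStr, pvN] using h2
          · by_cases hq : c = '"'
            · subst hq; simp [pvLoopA, pvStepA, pvSkipStr, pvN]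
            · simp only [List.length_cons] at hl
              have h2 := ih rest (by omega)
              simpa [pvLoopA, pvStepA, pvSkipStr, pvN, hb, hq] using h2

theorem pvStr3A (bk br cnt : Int) : ∀ (n : Nat) (l : List Char), l.length ≤ n →
    (pvLoopA { pvN bk br cnt with s3 := true } l).cnt
      = (pvLoopA (pvN bk br cnt) (pvSkipStr '`' l)).cnt := by
  intro n
  induction n with
  | zero =>
      intro l hl
      have : l = [] := List.eq_nil_of_length_eq_zero (Nat.le_zero.mp hl)
      subst this; simp [pvLoopA, pvSkipStr]
  | succ n ih =>
      intro l hl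
      cases l with
      | nil => simp [pvLoopA, pvSkipStr]
      | cons c rest =>
          by_cases hb : c = '\\'
          · subst hb
            cases rest with
            | nil => simp [pvLoopA, pvStepA, pvSkipStr, pvN]
            | cons d rest2 =>
                simp only [pvLoopA, pvSkipStr, pvStepA, pvN]
                simp only [List.length_cons] at hl
                have h2 := ih rest2 (by omega)
                simpa [pvLoopA, pvStepA, pvSkipStr, pvN] using h2
          · by_cases hq : c = '`'
            · subst hq; simp [pvLoopA, pvStepA, pvSkipStr, pvN]
            · simp only [List.length_cons] at hl
              have h2 := ih rest (by omega)
              simpa [pvLoopA, pvStepA, pvSkipStr, pvN, hb, hq] using h2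


theorem pvMain : ∀ (n : Nat) (l : List Char) (bk br cnt : Int), l.length ≤ n →
    (pvLoopA (pvN bk br cnt) l).cnt = pvLoopB bk br cnt l := by
  intro n
  induction n with
  | zero =>
      intro l bk br cnt hl
      cases l with
      | nil => simp [pvLoopA, pvLoopB, pvN]
      | cons c rest => simp at hl
  | succ n ih =>
      intro l bk br cnt hl
      cases l with
      | nil => simp [pvLoopA, pvLoopB, pvN]
      | cons c rest =>
          simp only [List.length_cons] at hl
          by_cases h1 : c = '/' ∧ rest.head? = some '/'
          · obtain ⟨rfl, hh⟩ := h1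
            cases rest with
            | nil => simp at hh
            | cons d rest2 =>
                simp only [List.head?_cons, Option.some.injEq] at hh
                subst hh
                simp only [List.length_cons] at hl
                have hIH := ih (pvSkipLine rest2) bk br cnt
                  (by have := pvSkipLine_length_le rest2; omega)
                simpa [pvLoopA, pvStepA, pvLoopB, pvN] using
                  (pvLineA bk br cnt rest2).trans hIH
          · by_cases h2 : c = '/' ∧ rest.head? = some '*'
            · obtain ⟨rfl, hh⟩ := h2
              have hIH := ih (pvSkipBlock rest) bk br cnt
                (by have := pvSkipBlock_length_le rest; omega)
              simpa [pvLoopA, pvStepA, pvLoopB, pvN, hh] using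
                (pvBlockA bk br cnt rest).trans hIH
            · by_cases hq1 : c = '\''
              · subst hq1
                have hIH := ih (pvSkipStr '\'' rest) bk br cnt
                  (by have := pvSkipStr_length_le '\'' rest.length rest (le_refl _); omega)
                simpa [pvLoopA, pvStepA, pvLoopB, pvN] using
                  (pvStr1A bk br cnt rest.length rest (le_refl _)).trans hIH
              · by_cases hq2 : c = '"'
                · subst hq2
                  have hIH := ih (pvSkipStr '"' rest) bk br cnt
                    (by have := pvSkipStr_length_le '"' rest.length rest (le_refl _); omega)
                  simpa [pvLoopA, pvStepA, pvLoopB, pvN] using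
                    (pvStr2A bk br cnt rest.length rest (le_refl _)).trans hIH
                · by_cases hq3 : c = '`'
                  · subst hq3
                    have hIH := ih (pvSkipStr '`' rest) bk br cnt
                      (by have := pvSkipStr_length_le '`' rest.length rest (le_refl _); omega)
                    simpa [pvLoopA, pvStepA, pvLoopB, pvN] using
                      (pvStr3A bk br cnt rest.length rest (le_refl _)).trans hIH
                  · by_cases hb1 : c = '['
                    · subst hb1
                      have hIH := ih rest (bk + 1) br cnt (by omega)
                      simpa [pvLoopA, pvStepA, pvLoopB, pvN] using hIH
                    · by_cases hb2 : c = ']'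
                      · subst hb2
                        have hIH := ih rest (bk - 1) br cnt (by omega)
                        simpa [pvLoopA, pvStepA, pvLoopB, pvN] using hIH
                      · by_cases hc1 : c = '{'
                        · subst hc1
                          have hIH := ih rest bk (br + 1)
                            (if bk = 1 ∧ br = 0 then cnt + 1 else cnt) (by omega)
                          simpa [pvLoopA, pvStepA, pvLoopB, pvN] using hIH
                        · by_cases hc2 : c = '}'
                          · subst hc2
                            have hIH := ih rest bk (br - 1) cnt (by omega)
                            simpa [pvLoopA, pvStepA, pvLoopB, pvN] using hIH
                          · have hIH := ih rest bk br cnt (by omega)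
                            simpa [pvLoopA, pvStepA, pvLoopB, pvN, h1, h2,
                                   hq1, hq2, hq3, hb1, hb2, hc1, hc2] using hIH

-- ===== VERDICT (by name: the statement is the Claim_ definition above) =====
theorem count_top_level_objects_in_array_spec : Claim_equal_count_top_level_objects_in_array := by
  intro s _
  unfold Spec_count_top_level_objects_in_array count_top_level_objects_in_array count_top_level_objects_in_array_alt
  have := pvMain s.toList.length s.toList 0 0 0 (le_refl _)
  simpa [pvN] using this
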